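-- pv_equiv track=rewrite | github.com/Nathnael45/Study-Buddy-Backend | src/schedule_data.py | decompress_availability
-- ===== SOURCE A (Python) =====
-- def decompress_availability(compressed_string):
--     """
--     Decompress string back to binary format
--     Example: "3c2a3" -> "111000110111"
--     """
--     binary = ""
--     number_buffer = ""
--
--     for char in compressed_string:
--         if char.isdigit():
--             # Accumulate digits into number_buffer
--             number_buffer += char
--         else:
--             # If we had numbers before this letter, process them
--             if number_buffer:
--                 binary += '1' * int(number_buffer)
--                 number_buffer = ""
--
--             # Process the letter (sequences of 0s)
--             num_zeros = ord(char) - ord('a') + 1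
--             binary += '0' * num_zeros
--
--     # Handle any remaining numbers at the end
--     if number_buffer:
--         binary += '1' * int(number_buffer)
--
--     return binary
-- ===== SOURCE B (Python) =====
-- def decompress_availability(compressed_string):
--     """
--     Decompress string back to binary format
--     Example: "3c2a3" -> "111000110111"
--     Tokenize-then-emit: scan with an index, grab each maximal digit run
--     in one slice (no digit-buffer state machine, no trailing flush).
--     """
--     pieces = []
--     i, n = 0, len(compressed_string)
--     while i < n:
--         c = compressed_string[i]
--         if c.isdigit():
--             j = i + 1
--             while j < n and compressed_string[j].isdigit():
--                 j += 1
--             pieces.append('1' * int(compressed_string[i:j]))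
--             i = j
--         else:
--             pieces.append('0' * (ord(c) - ord('a') + 1))
--             i += 1
--     return ''.join(pieces)
-- ===== Notes on version B (the rewrite author's own statement) =====
-- stated objective: alternative
-- what changed: Replaces A's digit-buffer state machine (accumulate digits, flush on non-digit and again after the loop) with a single tokenize-then-emit index scan: each maximal digit run is taken as one slice and converted directly, so there is no carried buffer state and no trailing flush.
import Mathlib
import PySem

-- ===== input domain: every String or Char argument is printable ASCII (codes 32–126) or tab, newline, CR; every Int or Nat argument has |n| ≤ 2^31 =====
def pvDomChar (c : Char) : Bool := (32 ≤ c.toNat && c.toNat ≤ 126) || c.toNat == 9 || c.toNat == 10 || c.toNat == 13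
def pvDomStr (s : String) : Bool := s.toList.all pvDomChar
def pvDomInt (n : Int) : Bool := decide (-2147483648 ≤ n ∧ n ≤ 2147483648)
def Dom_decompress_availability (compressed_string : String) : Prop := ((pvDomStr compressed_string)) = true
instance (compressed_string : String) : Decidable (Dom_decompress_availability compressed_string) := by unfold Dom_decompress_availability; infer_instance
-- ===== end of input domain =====

-- B differs from A only in decomposition (tokenize-then-emit vs digit-buffer state machine); same cost.

-- Shared primitives both Pythons call: '1' * int(ds) and '0' * (ord c - ord 'a' + 1).
-- int() never raises here: it is only ever applied to a nonempty all-digit string, so getD 0 is never the default.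
def daOnes (ds : List Char) : List Char :=
  PySem.List.pyRepeat ['1'] ((PySem.Int.ofChars? ds).getD 0)

def daZeros (c : Char) : List Char :=
  PySem.List.pyRepeat ['0'] ((c.toNat : Int) - ('a'.toNat : Int) + 1)

-- ===== PORT A =====
-- A's loop: state = (binary so far, digit buffer); the [] case performs the final flush after the loop.
def daLoop (acc : List Char) (buf : List Char) : List Char → List Char
  | [] => acc ++ (if buf = [] then [] else daOnes buf)
  | c :: rest =>
      if PySem.Chars.isdigit c then
        daLoop acc (buf ++ [c]) rest
      else
        daLoop ((acc ++ (if buf = [] then [] else daOnes buf)) ++ daZeros c) [] rest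

def decompress_availability (compressed_string : String) : String :=
  String.ofList (daLoop [] [] compressed_string.toList)

-- ===== PORT B =====
-- B's scan: on a digit, take the whole maximal digit run at once (the inner while = takeWhile/dropWhile)
-- and emit its piece; otherwise emit the zeros piece; pieces are joined (flattened) at the end.
def dbPieces : List Char → List (List Char)
  | [] => []
  | c :: rest =>
      if PySem.Chars.isdigit c then
        daOnes (c :: rest.takeWhile PySem.Chars.isdigit)
          :: dbPieces (rest.dropWhile PySem.Chars.isdigit)
      else
        daZeros c :: dbPieces rest
termination_by l => l.length
decreasing_by
  · exact Nat.lt_succ_of_le (List.length_dropWhile_le _ _)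
  · exact Nat.lt_succ_self _

def decompress_availability_alt (compressed_string : String) : String :=
  String.ofList (dbPieces compressed_string.toList).flatten

-- ===== PRECONDITION & SPEC =====
def Spec_decompress_availability (compressed_string : String) (out : String) : Prop := out = decompress_availability_alt compressed_string
instance (compressed_string : String) (out : String) : Decidable (Spec_decompress_availability compressed_string out) := by unfold Spec_decompress_availability; infer_instance

-- ===== CLAIM (what is proved, stated in full; the proofs are below) =====
def Claim_equal_decompress_availability : Prop := ∀ (compressed_string : String), Dom_decompress_availability compressed_string → Spec_decompress_availability compressed_string (decompress_availability compressed_string)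

-- ===== LEMMAS AND PROOFS =====

theorem takeWhile_all_append {p : Char → Bool} {l : List Char}
    (h : ∀ x ∈ l, p x = true) (c : Char) (hc : p c = false) (r : List Char) :
    (l ++ c :: r).takeWhile p = l := by
  induction l with
  | nil => simp [hc]
  | cons a l ih =>
      have ha : p a = true := h a (by simp)
      simp [ha, ih (fun x hx => h x (by simp [hx]))]

theorem dropWhile_all_append {p : Char → Bool} {l : List Char}
    (h : ∀ x ∈ l, p x = true) (c : Char) (hc : p c = false) (r : List Char) :
    (l ++ c :: r).dropWhile p = c :: r := by
  induction l with
  | nil => simp [hc]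
  | cons a l ih =>
      have ha : p a = true := h a (by simp)
      simp [ha, ih (fun x hx => h x (by simp [hx]))]

theorem daLoop_eq_pieces :
    ∀ (cs acc buf : List Char),
      (∀ d ∈ buf, PySem.Chars.isdigit d = true) →
      daLoop acc buf cs = acc ++ (dbPieces (buf ++ cs)).flatten := by
  intro cs
  induction cs with
  | nil =>
      intro acc buf hbuf
      cases buf with
      | nil => simp [daLoop, dbPieces]
      | cons d ds =>
          have hd : PySem.Chars.isdigit d = true := hbuf d (by simp)
          have htw : ds.takeWhile PySem.Chars.isdigit = ds :=
            List.takeWhile_eq_self_iff.mpr (fun x hx => hbuf x (by simp [hx]))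
          have hdw : ds.dropWhile PySem.Chars.isdigit = [] :=
            List.dropWhile_eq_nil_iff.mpr (fun x hx => hbuf x (by simp [hx]))
          simp [daLoop, dbPieces, hd, htw, hdw]
  | cons c rest ih =>
      intro acc buf hbuf
      by_cases hc : PySem.Chars.isdigit c = true
      · have h' : ∀ d ∈ buf ++ [c], PySem.Chars.isdigit d = true := by
          intro d hd
          rcases List.mem_append.mp hd with h | h
          · exact hbuf d h
          · simp at h; simpa [h] using hc
        have := ih acc (buf ++ [c]) h'
        simp only [daLoop, hc, if_true] at *
        rw [this, List.append_assoc]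
        simp
      · have hc' : PySem.Chars.isdigit c = false := by simpa using hc
        have lhs : daLoop acc buf (c :: rest)
            = daLoop ((acc ++ (if buf = [] then [] else daOnes buf)) ++ daZeros c) [] rest := by
          simp [daLoop, hc']
        rw [lhs, ih _ [] (by simp)]
        cases buf with
        | nil => simp [dbPieces, hc']
        | cons d ds =>
            have hd : PySem.Chars.isdigit d = true := hbuf d (by simp)
            have hds : ∀ x ∈ ds, PySem.Chars.isdigit x = true :=
              fun x hx => hbuf x (by simp [hx])
            have htw := takeWhile_all_append hds c hc' rest
            have hdw := dropWhile_all_append hds c hc' rest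
            simp [dbPieces, hd, hc', htw, hdw]

-- ===== VERDICT (by name: the statement is the Claim_ definition above) =====
theorem decompress_availability_spec : Claim_equal_decompress_availability := by
  intro s _
  unfold Spec_decompress_availability decompress_availability decompress_availability_alt
  rw [daLoop_eq_pieces s.toList [] [] (by simp)]
  simp
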